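-- pv_equiv track=rewrite | github.com/seantw0301/aiserver2 | remove/common_i_p.py | _count_available_rooms_in_period
-- ===== SOURCE A (Python) =====
-- from typing import Dict, List, Optional
--
-- def _count_available_rooms_in_period(store_status: Dict, time_slots: List[str],
--                                    start_index: int, required_slots: int, date_str: str) -> int:
--     """
--     計算指定時間段內可用的房間數量
--
--     Args:
--         store_status: 店家狀態數據
--         time_slots: 所有時間段列表
--         start_index: 開始時間索引
--         required_slots: 需要檢查的時間段數
--         date_str: 日期字符串
--
--     Returns:
--         int: 可用房間數量
--     """
--     # 假設最多4個房間
--     room_ids = [1, 2, 3, 4]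
--     available_rooms = 0
--
--     for room_id in room_ids:
--         room_available = True
--
--         # 檢查這個房間在整個所需時間段內是否都可用
--         for i in range(start_index, min(start_index + required_slots, len(time_slots))):
--             time_slot = time_slots[i]
--             full_time_key = f"{date_str} {time_slot}"
--             room_status = store_status.get(full_time_key, {})
--             is_occupied = room_status.get(room_id, False)
--
--             if is_occupied:
--                 room_available = False
--                 break
--
--         if room_available:
--             available_rooms += 1
--
--     return available_rooms
-- ===== SOURCE B (Python) =====
-- def _count_available_rooms_in_period(store_status, time_slots,
--                                      start_index, required_slots, date_str):
--     mask = 0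
--     for i in range(start_index, min(start_index + required_slots, len(time_slots))):
--         status = store_status.get(f"{date_str} {time_slots[i]}", {})
--         mask |= sum(1 << (r - 1) for r in (1, 2, 3, 4) if status.get(r, False))
--     return 4 - bin(mask & 15).count("1")
-- ===== Notes on version B (the rewrite author's own statement) =====
-- stated objective: alternative
-- what changed: Replaced A's per-room rescans of the window (4 boolean scans with early break) with a single pass over the slot window that ORs each slot's occupancy into a 4-bit occupancy bitmask, returning 4 minus the popcount of the mask.
import Mathlib
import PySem

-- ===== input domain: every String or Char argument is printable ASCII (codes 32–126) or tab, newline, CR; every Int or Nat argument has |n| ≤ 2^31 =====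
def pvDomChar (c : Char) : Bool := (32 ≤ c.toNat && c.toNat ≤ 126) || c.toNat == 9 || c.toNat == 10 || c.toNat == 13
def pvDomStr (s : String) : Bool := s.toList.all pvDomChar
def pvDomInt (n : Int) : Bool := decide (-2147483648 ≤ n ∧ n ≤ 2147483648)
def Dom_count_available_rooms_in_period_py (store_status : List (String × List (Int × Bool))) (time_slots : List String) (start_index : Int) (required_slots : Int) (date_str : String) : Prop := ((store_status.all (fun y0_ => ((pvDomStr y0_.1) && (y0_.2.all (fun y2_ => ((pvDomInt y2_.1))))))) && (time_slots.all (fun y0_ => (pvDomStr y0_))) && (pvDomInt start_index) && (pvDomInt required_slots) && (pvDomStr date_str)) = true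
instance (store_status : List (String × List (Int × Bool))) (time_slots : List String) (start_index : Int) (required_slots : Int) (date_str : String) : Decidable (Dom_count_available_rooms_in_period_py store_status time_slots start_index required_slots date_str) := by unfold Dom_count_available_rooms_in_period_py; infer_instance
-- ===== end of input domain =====

-- B replaces A's per-room rescans of the slot window by a single pass that ORs each slot's
-- occupancy into a 4-bit bitmask and returns 4 minus its popcount (alternative decomposition).

-- ===== PORT A =====
-- inner loop of A for one room: scan the window indices, break (return false) on the first occupied slot
def pvA_roomAvail (store_status : List (String × List (Int × Bool))) (time_slots : List String)
    (date_str : String) (room_id : Int) : List Int → Bool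
  | [] => true
  | i :: rest =>
    match PySem.List.pyGet? time_slots i with
    | none => true  -- Python raises IndexError here; excluded by Pre_
    | some time_slot =>
      let full_time_key := date_str ++ " " ++ time_slot
      let room_status := (store_status.lookup full_time_key).getD []
      let is_occupied := (room_status.lookup room_id).getD false
      if is_occupied then false
      else pvA_roomAvail store_status time_slots date_str room_id rest

def count_available_rooms_in_period_py (store_status : List (String × List (Int × Bool))) (time_slots : List String) (start_index : Int) (required_slots : Int) (date_str : String) : Int :=
  let room_ids : List Int := [1, 2, 3, 4]
  let idxs := PySem.List.pyRange start_index (min (start_index + required_slots) (time_slots.length : Int)) 1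
  room_ids.foldl (fun available_rooms room_id =>
    if pvA_roomAvail store_status time_slots date_str room_id idxs then available_rooms + 1
    else available_rooms) 0

-- ===== PORT B =====
-- port of B's `sum(1 << (r - 1) for r in (1, 2, 3, 4) if status.get(r, False))`
def pvB_slotBits (status : List (Int × Bool)) : Nat :=
  ([1, 2, 3, 4] : List Int).foldl
    (fun s r => if (status.lookup r).getD false then s + (1 <<< (r - 1).toNat) else s) 0

-- B's loop: OR each window slot's occupancy bits into the running mask
def pvB_mask (store_status : List (String × List (Int × Bool))) (time_slots : List String)
    (date_str : String) : List Int → Nat → Nat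
  | [], mask => mask
  | i :: rest, mask =>
    let mask' :=
      match PySem.List.pyGet? time_slots i with
      | none => mask  -- Python raises IndexError here; excluded by Pre_
      | some time_slot =>
        mask ||| pvB_slotBits ((store_status.lookup (date_str ++ " " ++ time_slot)).getD [])
    pvB_mask store_status time_slots date_str rest mask'

-- hand port of `bin(m & 15).count("1")`: m & 15 has only bits 0–3, so counting those four
-- bits is exactly the number of '1' characters in its binary representation
def pvB_popcount4 (m : Nat) : Int :=
  (cond (m.testBit 0) 1 0) + (cond (m.testBit 1) 1 0) +
  (cond (m.testBit 2) 1 0) + (cond (m.testBit 3) 1 0)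

def count_available_rooms_in_period_py_alt (store_status : List (String × List (Int × Bool))) (time_slots : List String) (start_index : Int) (required_slots : Int) (date_str : String) : Int :=
  let idxs := PySem.List.pyRange start_index (min (start_index + required_slots) (time_slots.length : Int)) 1
  let mask := pvB_mask store_status time_slots date_str idxs 0
  4 - pvB_popcount4 (mask &&& 15)

-- ===== PRECONDITION & SPEC =====
-- Pre_ excludes exactly the IndexError inputs: a nonempty window whose first index start_index
-- is below -len(time_slots) (Python raises on time_slots[i] there).
def Pre_count_available_rooms_in_period_py (store_status : List (String × List (Int × Bool))) (time_slots : List String) (start_index : Int) (required_slots : Int) (date_str : String) : Prop :=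
  (1 ≤ required_slots ∧ start_index < (time_slots.length : Int)) → -(time_slots.length : Int) ≤ start_index
instance (store_status : List (String × List (Int × Bool))) (time_slots : List String) (start_index : Int) (required_slots : Int) (date_str : String) : Decidable (Pre_count_available_rooms_in_period_py store_status time_slots start_index required_slots date_str) := by unfold Pre_count_available_rooms_in_period_py; infer_instance
def pvWitness_count_available_rooms_in_period_py : (List (String × List (Int × Bool))) × List String × Int × Int × String :=
  ([("d 09", [(1, true)])], ["09", "10"], 0, 2, "d")

def Spec_count_available_rooms_in_period_py (store_status : List (String × List (Int × Bool))) (time_slots : List String) (start_index : Int) (required_slots : Int) (date_str : String) (out : Int) : Prop := out = count_available_rooms_in_period_py_alt store_status time_slots start_index required_slots date_str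
instance (store_status : List (String × List (Int × Bool))) (time_slots : List String) (start_index : Int) (required_slots : Int) (date_str : String) (out : Int) : Decidable (Spec_count_available_rooms_in_period_py store_status time_slots start_index required_slots date_str out) := by unfold Spec_count_available_rooms_in_period_py; infer_instance

-- ===== CLAIM (what is proved, stated in full; the proofs are below) =====
def Claim_equal_count_available_rooms_in_period_py : Prop := ∀ (store_status : List (String × List (Int × Bool))) (time_slots : List String) (start_index : Int) (required_slots : Int) (date_str : String), Dom_count_available_rooms_in_period_py store_status time_slots start_index required_slots date_str → Pre_count_available_rooms_in_period_py store_status time_slots start_index required_slots date_str → Spec_count_available_rooms_in_period_py store_status time_slots start_index required_slots date_str (count_available_rooms_in_period_py store_status time_slots start_index required_slots date_str)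

-- ===== LEMMAS AND PROOFS =====

-- occupancy of room r in slot index i (proof-only abstraction)
def pvOcc (store_status : List (String × List (Int × Bool))) (time_slots : List String)
    (date_str : String) (i : Int) (r : Int) : Bool :=
  match PySem.List.pyGet? time_slots i with
  | none => false
  | some time_slot =>
    (((store_status.lookup (date_str ++ " " ++ time_slot)).getD []).lookup r).getD false

-- proof-only: the 4-bit mask with the given room bits
def pvBits (a b c d : Bool) : Nat :=
  (cond a 1 0) + (cond b 2 0) + (cond c 4 0) + (cond d 8 0)

theorem pvA_roomAvail_eq_not_any (ss : List (String × List (Int × Bool))) (ts : List String)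
    (ds : String) (r : Int) (is : List Int)
    (hv : ∀ i ∈ is, (PySem.List.pyGet? ts i).isSome) :
    pvA_roomAvail ss ts ds r is = !(is.any (fun i => pvOcc ss ts ds i r)) := by
  induction is with
  | nil => rfl
  | cons i rest ih =>
    have h := hv i (by simp)
    obtain ⟨t, ht⟩ := Option.isSome_iff_exists.mp h
    have hocc : pvOcc ss ts ds i r
        = (((ss.lookup (ds ++ " " ++ t)).getD []).lookup r).getD false := by
      simp [pvOcc, ht]
    cases hb : (((ss.lookup (ds ++ " " ++ t)).getD []).lookup r).getD false with
    | true => simp [pvA_roomAvail, ht, hb, hocc]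
    | false =>
      simp only [pvA_roomAvail, ht, hb]
      rw [ih (fun j hj => hv j (by simp [hj]))]
      simp [hocc, hb]

theorem pvB_slotBits_eq (st : List (Int × Bool)) :
    pvB_slotBits st = pvBits ((st.lookup 1).getD false) ((st.lookup 2).getD false)
      ((st.lookup 3).getD false) ((st.lookup 4).getD false) := by
  cases h1 : (st.lookup 1).getD false <;> cases h2 : (st.lookup 2).getD false <;>
    cases h3 : (st.lookup 3).getD false <;> cases h4 : (st.lookup 4).getD false <;>
    simp [pvB_slotBits, pvBits, List.foldl, h1, h2, h3, h4]

theorem pvBits_or (a b c d a' b' c' d' : Bool) :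
    pvBits a b c d ||| pvBits a' b' c' d' = pvBits (a || a') (b || b') (c || c') (d || d') := by
  cases a <;> cases b <;> cases c <;> cases d <;>
    cases a' <;> cases b' <;> cases c' <;> cases d' <;> rfl

theorem pvB_mask_eq (ss : List (String × List (Int × Bool))) (ts : List String) (ds : String)
    (is : List Int) (a b c d : Bool)
    (hv : ∀ i ∈ is, (PySem.List.pyGet? ts i).isSome) :
    pvB_mask ss ts ds is (pvBits a b c d)
      = pvBits (a || is.any (fun i => pvOcc ss ts ds i 1)) (b || is.any (fun i => pvOcc ss ts ds i 2))
               (c || is.any (fun i => pvOcc ss ts ds i 3)) (d || is.any (fun i => pvOcc ss ts ds i 4)) := by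
  induction is generalizing a b c d with
  | nil => simp [pvB_mask]
  | cons i rest ih =>
    have h := hv i (by simp)
    obtain ⟨t, ht⟩ := Option.isSome_iff_exists.mp h
    have hocc : ∀ r, pvOcc ss ts ds i r
        = (((ss.lookup (ds ++ " " ++ t)).getD []).lookup r).getD false := by
      intro r; simp [pvOcc, ht]
    simp only [pvB_mask, ht]
    rw [pvB_slotBits_eq, pvBits_or, ih _ _ _ _ (fun j hj => hv j (by simp [hj]))]
    simp only [List.any_cons, hocc]
    simp [Bool.or_assoc]

theorem count_available_rooms_equal (ss : List (String × List (Int × Bool))) (ts : List String)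
    (si rq : Int) (ds : String)
    (hpre : Pre_count_available_rooms_in_period_py ss ts si rq ds) :
    count_available_rooms_in_period_py ss ts si rq ds
      = count_available_rooms_in_period_py_alt ss ts si rq ds := by
  set idxs := PySem.List.pyRange si (min (si + rq) (ts.length : Int)) 1 with hidxs
  have hv : ∀ i ∈ idxs, (PySem.List.pyGet? ts i).isSome := by
    intro i hi
    rw [hidxs, PySem.List.mem_pyRange_one] at hi
    have hlo : -(ts.length : Int) ≤ i := by
      have := hpre ⟨by omega, by omega⟩
      omega
    have hhi : i < (ts.length : Int) := by omega
    cases h : PySem.List.pyGet? ts i with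
    | none => exact absurd ⟨hlo, hhi⟩ ((PySem.List.pyGet?_eq_none_iff ts i).mp h)
    | some _ => rfl
  have hany := fun r => pvA_roomAvail_eq_not_any ss ts ds r idxs hv
  set p : Int → Bool := fun r => idxs.any (fun i => pvOcc ss ts ds i r) with hp
  have hA : count_available_rooms_in_period_py ss ts si rq ds
      = ([1,2,3,4] : List Int).foldl (fun a r => if !(p r) then a + 1 else a) 0 := by
    simp only [count_available_rooms_in_period_py, ← hidxs]
    refine PySem.List.foldl_congr_mem _ _ _ _ ?_
    intro acc r _
    rw [hany r]
  have hmask : pvB_mask ss ts ds idxs 0 = pvBits (p 1) (p 2) (p 3) (p 4) := by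
    have h0 : (0 : Nat) = pvBits false false false false := rfl
    rw [h0, pvB_mask_eq ss ts ds idxs false false false false hv]
    simp [hp]
  simp only [count_available_rooms_in_period_py_alt, ← hidxs]
  rw [hA, hmask]
  cases h1 : p 1 <;> cases h2 : p 2 <;> cases h3 : p 3 <;> cases h4 : p 4 <;>
    simp [List.foldl, pvBits, pvB_popcount4, h1, h2, h3, h4] <;> decide

-- ===== VERDICT (by name: the statement is the Claim_ definition above) =====
theorem count_available_rooms_in_period_py_spec : Claim_equal_count_available_rooms_in_period_py := by
  intro ss ts si rq ds _ hpre
  unfold Spec_count_available_rooms_in_period_py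
  exact count_available_rooms_equal ss ts si rq ds hpre
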